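-- pv_equiv track=rewrite | github.com/dstada/HackerRank.com | Happy Ladybugs.py | check_happy
-- ===== SOURCE A (Python) =====
-- def check_happy(b):
--     overall_happy = True
--     for i in range(len(b)):
--         happy = False
--         # If left or right is the same colour bug, then happy:
--         if (i - 1 >= 0 and b[i - 1] == b[i]) or i + 1 < len(b) and b[i + 1] == b[i]:
--             happy = True
--         else:
--             overall_happy = False
--     return overall_happy
-- ===== SOURCE B (Python) =====
-- def check_happy(b):
--     # Every ladybug is happy iff every maximal run of equal adjacent
--     # colours has length at least 2: scan run by run with an early exit.
--     i, n = 0, len(b)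
--     while i < n:
--         j = i + 1
--         while j < n and b[j] == b[i]:
--             j += 1
--         if j - i < 2:
--             return False
--         i = j
--     return True
-- ===== Notes on version B (the rewrite author's own statement) =====
-- stated objective: alternative
-- what changed: A checks every index for a same-coloured neighbour and keeps a flag to the end; B groups the string into maximal runs of equal adjacent characters and returns whether every run has length >= 2, exiting early at the first short run.
import Mathlib
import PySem

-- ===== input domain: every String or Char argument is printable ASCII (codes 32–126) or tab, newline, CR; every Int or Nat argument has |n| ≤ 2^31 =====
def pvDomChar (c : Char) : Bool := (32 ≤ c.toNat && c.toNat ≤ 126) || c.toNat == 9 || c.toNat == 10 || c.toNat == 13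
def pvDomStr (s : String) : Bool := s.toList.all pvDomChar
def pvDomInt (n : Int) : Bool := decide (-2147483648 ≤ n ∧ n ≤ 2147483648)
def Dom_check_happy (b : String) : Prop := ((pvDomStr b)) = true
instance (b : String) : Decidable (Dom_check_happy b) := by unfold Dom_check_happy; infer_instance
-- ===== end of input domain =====

-- B replaces A's per-index neighbour test by a run-by-run scan: every maximal run
-- of equal adjacent characters must have length ≥ 2 (alternative decomposition).

-- ===== PORT A =====
-- the condition of A's if, as a helper (guards mirror Python's short-circuit bounds checks)
def condA (l : List Char) (i : Nat) : Bool :=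
  (decide (1 ≤ i) && (l.getD (i - 1) 'a' == l.getD i 'a')) ||
  (decide (i + 1 < l.length) && (l.getD (i + 1) 'a' == l.getD i 'a'))

def check_happy (b : String) : Bool :=
  let l := b.toList
  (List.range l.length).foldl
    (fun overall_happy i => if condA l i then overall_happy else false) true

-- ===== PORT B =====
-- inner while: length of the leading run of `c` in the remaining list
def runLen (c : Char) : List Char → Nat
  | [] => 0
  | x :: xs => if x == c then runLen c xs + 1 else 0

-- outer while over the remaining suffix, early return False on a short run
def bugsLoop : List Char → Bool
  | [] => true
  | c :: rest =>
    let k := 1 + runLen c rest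
    if k < 2 then false
    else bugsLoop (rest.drop (k - 1))
termination_by l => l.length
decreasing_by
  simp only [List.length_drop, List.length_cons]
  omega

def check_happy_alt (b : String) : Bool := bugsLoop b.toList

-- ===== PRECONDITION & SPEC =====
def Spec_check_happy (b : String) (out : Bool) : Prop := out = check_happy_alt b
instance (b : String) (out : Bool) : Decidable (Spec_check_happy b out) := by unfold Spec_check_happy; infer_instance

-- ===== CLAIM (what is proved, stated in full; the proofs are below) =====
def Claim_equal_check_happy : Prop := ∀ (b : String), Dom_check_happy b → Spec_check_happy b (check_happy b)

-- ===== LEMMAS AND PROOFS =====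

theorem foldl_if_all (c : Nat → Bool) (xs : List Nat) (acc : Bool) :
    xs.foldl (fun a i => if c i then a else false) acc = (acc && xs.all c) := by
  induction xs generalizing acc with
  | nil => simp
  | cons x xs ih =>
    simp only [List.foldl_cons, List.all_cons, ih]
    cases h : c x <;> simp [h]

theorem take_runLen (c : Char) (xs : List Char) :
    xs.take (runLen c xs) = List.replicate (runLen c xs) c := by
  induction xs with
  | nil => simp [runLen]
  | cons x xs ih =>
    simp only [runLen]
    split
    · next h => simp [List.take_succ_cons, List.replicate_succ, ih, (beq_iff_eq).mp h]
    · simp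

theorem drop_runLen_head (c : Char) (xs : List Char) :
    xs.drop (runLen c xs) = [] ∨ (xs.drop (runLen c xs)).getD 0 'a' ≠ c := by
  induction xs with
  | nil => left; simp
  | cons x xs ih =>
    simp only [runLen]
    split
    · next h => simpa using ih
    · next h => right; simpa using (by simpa using h : ¬ x = c)

theorem rep_get_left {k : Nat} {c : Char} {t : List Char} {i : Nat} (h : i < k) :
    (List.replicate k c ++ t)[i]? = some c := by
  rw [List.getElem?_append_left (by simpa using h)]
  simp [List.getElem?_replicate, h]

theorem rep_get_right {k : Nat} {c : Char} {t : List Char} {j : Nat} :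
    (List.replicate k c ++ t)[k + j]? = t[j]? := by
  rw [List.getElem?_append_right (by simp)]
  simp

theorem getD_rep_left {k : Nat} {c : Char} {t : List Char} {i : Nat} (h : i < k) :
    (List.replicate k c ++ t).getD i 'a' = c := by
  simp [List.getD_eq_getElem?_getD, rep_get_left h]

theorem getD_rep_right {k : Nat} {c : Char} {t : List Char} {j : Nat} :
    (List.replicate k c ++ t).getD (k + j) 'a' = t.getD j 'a' := by
  simp [List.getD_eq_getElem?_getD, rep_get_right]

-- shifting A's condition across a leading run of length k ≥ 1
theorem condA_shift {k : Nat} {c : Char} {t : List Char} (hk : 1 ≤ k)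
    (ht : t = [] ∨ t.getD 0 'a' ≠ c) (j : Nat) (hj : j < t.length) :
    condA (List.replicate k c ++ t) (k + j) = condA t j := by
  have hlen : (List.replicate k c ++ t).length = k + t.length := by simp
  have ht0 : t.getD 0 'a' ≠ c := by
    rcases ht with h | h
    · subst h; simp at hj
    · exact h
  cases j with
  | zero =>
    have h1 : (List.replicate k c ++ t).getD (k - 1) 'a' = c := getD_rep_left (by omega)
    have h2 : (List.replicate k c ++ t).getD k 'a' = t.getD 0 'a' := by
      simpa using (getD_rep_right (k := k) (c := c) (t := t) (j := 0))
    have h3 : (List.replicate k c ++ t).getD (k + 1) 'a' = t.getD 1 'a' :=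
      getD_rep_right
    have hb : (c == t.getD 0 'a') = false := by
      simp only [beq_eq_false_iff_ne]; exact fun h => ht0 h.symm
    simp only [condA, Nat.add_zero, hlen, h1, h2, h3, hb]
    rw [show decide (1 ≤ (0:Nat)) = false from rfl]
    simp [Nat.add_lt_add_iff_left]
  | succ m =>
    have h1 : (List.replicate k c ++ t).getD (k + m) 'a' = t.getD m 'a' := getD_rep_right
    have h2 : (List.replicate k c ++ t).getD (k + (m + 1)) 'a' = t.getD (m + 1) 'a' :=
      getD_rep_right
    have h3 : (List.replicate k c ++ t).getD (k + (m + 1) + 1) 'a' = t.getD (m + 1 + 1) 'a' := by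
      rw [show k + (m + 1) + 1 = k + (m + 1 + 1) from by omega]; exact getD_rep_right
    simp only [condA, hlen]
    rw [show k + (m + 1) - 1 = k + m from by omega, h1, h2, h3,
        show m + 1 - 1 = m from rfl,
        show k + (m + 1) + 1 = k + (m + 1 + 1) from by omega]
    rw [show decide (1 ≤ k + (m + 1)) = true from decide_eq_true (by omega),
        show decide (1 ≤ m + 1) = true from decide_eq_true (by omega)]
    simp [Nat.add_lt_add_iff_left]

theorem run_split_iff {k : Nat} {c : Char} {t : List Char} (hk : 2 ≤ k)
    (ht : t = [] ∨ t.getD 0 'a' ≠ c) :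
    (∀ i < (List.replicate k c ++ t).length, condA (List.replicate k c ++ t) i = true) ↔
    (∀ j < t.length, condA t j = true) := by
  have hlen : (List.replicate k c ++ t).length = k + t.length := by simp
  constructor
  · intro h j hj
    rw [← condA_shift (k := k) (c := c) (t := t) (by omega) ht j hj]
    exact h (k + j) (by rw [hlen]; omega)
  · intro h i hi
    rw [hlen] at hi
    by_cases hik : i < k
    · cases i with
      | zero =>
        have h1 : (List.replicate k c ++ t).getD 0 'a' = c := getD_rep_left (by omega)
        have h2 : (List.replicate k c ++ t).getD 1 'a' = c := getD_rep_left (by omega)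
        simp only [condA, hlen]
        rw [show (0:Nat) + 1 = 1 from rfl, h1, h2]
        simp
        omega
      | succ m =>
        have h1 : (List.replicate k c ++ t).getD m 'a' = c := getD_rep_left (by omega)
        have h2 : (List.replicate k c ++ t).getD (m + 1) 'a' = c := getD_rep_left (by omega)
        simp only [condA, Nat.add_sub_cancel]
        rw [h1, h2]
        simp
    · have hj : i - k < t.length := by omega
      have hsh := condA_shift (k := k) (c := c) (t := t) (by omega) ht (i - k) hj
      rw [show k + (i - k) = i from by omega] at hsh
      rw [hsh]
      exact h _ hj

theorem bugsLoop_iff : ∀ (n : Nat) (l : List Char), l.length ≤ n →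
    (bugsLoop l = true ↔ ∀ i < l.length, condA l i = true) := by
  intro n
  induction n with
  | zero =>
    intro l hl
    have : l = [] := List.length_eq_zero_iff.mp (by omega)
    subst this
    simp [bugsLoop]
  | succ n ih =>
    intro l hl
    cases l with
    | nil => simp [bugsLoop]
    | cons c rest =>
      rw [bugsLoop]
      by_cases hr : runLen c rest = 0
      · -- short run at the front: index 0 is unhappy
        have hfalse : condA (c :: rest) 0 = false := by
          cases rest with
          | nil => simp [condA]
          | cons x xs =>
            have hx : (x == c) = false := by
              by_contra hxc
              simp only [beq_eq_false_iff_ne] at hxc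
              push_neg at hxc
              simp [runLen, hxc] at hr
            simp [condA, hx]
        rw [if_pos (by omega)]
        constructor
        · intro h; exact absurd h (by simp)
        · intro h
          have := h 0 (by simp)
          rw [hfalse] at this
          exact absurd this (by simp)
      · -- run of length 1 + runLen ≥ 2 at the front
        rw [if_neg (by omega)]
        have hsplit : (c :: rest) = List.replicate (1 + runLen c rest) c ++ rest.drop (runLen c rest) := by
          conv_lhs => rw [← List.take_append_drop (runLen c rest) rest]
          rw [take_runLen]
          simp [Nat.add_comm, List.replicate_succ]
        have hd : rest.drop (runLen c rest) = [] ∨ (rest.drop (runLen c rest)).getD 0 'a' ≠ c :=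
          drop_runLen_head c rest
        rw [show 1 + runLen c rest - 1 = runLen c rest from by omega]
        rw [ih (rest.drop (runLen c rest)) (by simp at hl ⊢; omega)]
        conv_rhs => rw [hsplit]
        exact (run_split_iff (by omega) hd).symm

-- ===== VERDICT (by name: the statement is the Claim_ definition above) =====
theorem check_happy_spec : Claim_equal_check_happy := by
  intro b _
  unfold Spec_check_happy check_happy check_happy_alt
  simp only [foldl_if_all, Bool.true_and]
  rw [Bool.eq_iff_iff]
  rw [bugsLoop_iff b.toList.length b.toList (le_refl _)]
  simp [List.all_eq_true, List.mem_range]
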